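-- pv_equiv track=rewrite | github.com/AnandaRachmawati/Phyton | Praktikum Dasar Pemograman/list of list/list of list praktikum.py | peringkat1
-- ===== SOURCE A (Python) =====
-- def firstList(L):
--     return L[0]
--
-- def tailList(S):
--     return S[1:]
--
-- def IsEmptyLoL(S):
--     return S == []
--
-- def IsOneElement(S):
--     if IsEmptyLoL(S):
--         return False
--     else:
--         return IsEmptyLoL(tailList(S))
--
-- def peringkat1(S):
--     if IsOneElement(S):
--         return firstList(S)
--     else:
--         if firstList(S)[1] >= peringkat1(tailList(S))[1]:
--             return firstList(S)
--         else:
--             return peringkat1(tailList(S))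
-- ===== SOURCE B (Python) =====
-- def peringkat1(S):
--     best = S[0]
--     for e in S[1:]:
--         if e[1] > best[1]:
--             best = e
--     return best
-- ===== Notes on version B (the rewrite author's own statement) =====
-- stated objective: simpler
-- what changed: Replaces the naive recursion (which re-evaluates peringkat1(tail) twice per level, exponential time) with a single iterative pass keeping the current best, using strict > so the earliest maximal element wins as A's >= does.
import Mathlib
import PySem

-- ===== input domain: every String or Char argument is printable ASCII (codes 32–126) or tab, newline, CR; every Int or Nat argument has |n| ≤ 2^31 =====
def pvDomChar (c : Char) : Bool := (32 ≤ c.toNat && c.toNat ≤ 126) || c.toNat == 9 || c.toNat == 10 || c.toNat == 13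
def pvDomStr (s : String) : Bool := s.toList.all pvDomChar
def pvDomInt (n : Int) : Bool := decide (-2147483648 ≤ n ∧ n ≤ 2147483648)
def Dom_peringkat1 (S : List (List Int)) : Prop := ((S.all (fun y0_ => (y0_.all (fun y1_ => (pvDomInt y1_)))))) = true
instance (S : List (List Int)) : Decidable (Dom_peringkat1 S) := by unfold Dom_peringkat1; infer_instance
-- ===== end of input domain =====

-- B replaces A's naive recursion (re-evaluating peringkat1(tail) twice per level) with one
-- iterative pass keeping the current best; equivalence proved on lists where Python A returns.

-- ===== PORT A =====
-- x[1]: Python indexing; none = IndexError, excluded by Pre_ (every element has length ≥ 2)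
def pvSec (x : List Int) : Int := (PySem.List.pyGet? x 1).getD 0

def peringkat1 (S : List (List Int)) : List Int :=
  match S with
  | [] => []                                -- Python raises IndexError here (outside Pre_)
  | [x] => x                                -- IsOneElement → firstList
  | x :: rest =>
      let r := peringkat1 rest              -- peringkat1(tailList(S))
      if pvSec x ≥ pvSec r then x else r

-- ===== PORT B =====
def pvStep (best e : List Int) : List Int := if pvSec e > pvSec best then e else best

def peringkat1_alt (S : List (List Int)) : List Int :=
  match S with
  | [] => []                                -- Python raises IndexError here (outside Pre_)
  | h :: t => t.foldl pvStep h              -- best = S[0]; for e in S[1:]: update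

-- ===== PRECONDITION & SPEC =====
-- Pre_ excludes exactly the inputs where Python A raises IndexError: the empty list and
-- multi-element lists containing an inner list of length < 2 (a singleton is returned unindexed).
def Pre_peringkat1 (S : List (List Int)) : Prop := S ≠ [] ∧ (S.length = 1 ∨ ∀ x ∈ S, 2 ≤ x.length)
instance (S : List (List Int)) : Decidable (Pre_peringkat1 S) := by unfold Pre_peringkat1; infer_instance
def pvWitness_peringkat1 : List (List Int) := [[1, 5], [2, 7], [3, 7]]

def Spec_peringkat1 (S : List (List Int)) (out : List Int) : Prop := out = peringkat1_alt S
instance (S : List (List Int)) (out : List Int) : Decidable (Spec_peringkat1 S out) := by unfold Spec_peringkat1; infer_instance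

-- ===== CLAIM (what is proved, stated in full; the proofs are below) =====
def Claim_equal_peringkat1 : Prop := ∀ (S : List (List Int)), Dom_peringkat1 S → Pre_peringkat1 S → Spec_peringkat1 S (peringkat1 S)

-- ===== LEMMAS AND PROOFS =====

-- Absorbing one step into the head preserves A's result.
theorem peringkat1_step (t : List (List Int)) (h e : List Int) :
    peringkat1 (pvStep h e :: t) = peringkat1 (h :: e :: t) := by
  cases t with
  | nil =>
      simp only [peringkat1, pvStep]
      by_cases hc : pvSec e > pvSec h <;> by_cases hd : pvSec h ≥ pvSec e <;>
        simp [hc, hd] <;> omega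
  | cons e' t'' =>
      simp only [peringkat1, pvStep]
      split_ifs <;> first | rfl | omega

theorem peringkat1_foldl (t : List (List Int)) (h : List Int) :
    peringkat1 (h :: t) = t.foldl pvStep h := by
  induction t generalizing h with
  | nil => rfl
  | cons e t' ih =>
      calc peringkat1 (h :: e :: t') = peringkat1 (pvStep h e :: t') := (peringkat1_step t' h e).symm
        _ = t'.foldl pvStep (pvStep h e) := ih (pvStep h e)
        _ = (e :: t').foldl pvStep h := rfl

-- ===== VERDICT (by name: the statement is the Claim_ definition above) =====
theorem peringkat1_spec : Claim_equal_peringkat1 := by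
  intro S _ _
  unfold Spec_peringkat1
  cases S with
  | nil => rfl
  | cons h t => simpa [peringkat1_alt] using peringkat1_foldl t h
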